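-- pv_equiv track=rewrite | github.com/yjnl/python_abbreviations | liu_getabbreviations.py | getBestAbbreviations
-- ===== SOURCE A (Python) =====
-- def getBestAbbreviations(AWdeduplicatedabbs,AWdeduplicatedscores):
--     bestforeachname = []
--
--     for nameindex in range(len(AWdeduplicatedabbs)):
--         bestforthisname = []
--         lowestscore = {}
--
--         # For the current name, going through every abbreviation to identify which
--         #     abbreviation score is the lowest
--         for abbindex in range(len(AWdeduplicatedabbs[nameindex])):
--
--             currentabbreviation = AWdeduplicatedabbs[nameindex][abbindex]
--             currentscore = AWdeduplicatedscores[nameindex][abbindex]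
--
--             if not lowestscore or lowestscore and currentscore < lowestscore['lowest']:
--                 lowestscore.update({'lowest':currentscore})
--
--         # After the lowest score is identified, goes through every abbreviation again
--         #     to check which abbreviations have those scores
--         for abbindex in range(len(AWdeduplicatedabbs[nameindex])):
--             if AWdeduplicatedscores[nameindex][abbindex] == lowestscore['lowest']:
--                 bestforthisname.append(AWdeduplicatedabbs[nameindex][abbindex])
--
--         bestforeachname.append(bestforthisname)
--
--     return bestforeachname
-- ===== SOURCE B (Python) =====
-- def getBestAbbreviations(AWdeduplicatedabbs, AWdeduplicatedscores):
--     bestforeachname = []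
--     for abbs, scores in zip(AWdeduplicatedabbs, AWdeduplicatedscores):
--         best_score = None
--         best_list = []
--         for abb, score in zip(abbs, scores):
--             if best_score is None or score < best_score:
--                 best_score = score
--                 best_list = [abb]
--             elif score == best_score:
--                 best_list.append(abb)
--         bestforeachname.append(best_list)
--     return bestforeachname
-- ===== Notes on version B (the rewrite author's own statement) =====
-- stated objective: simpler
-- what changed: A finds each name's minimum score with one indexed pass over a one-key dict and then re-scans the whole list to collect ties; B does a single zip pass per name maintaining the running best score and the running list of best abbreviations (one pass instead of two, no dict).
-- outside the precondition, e.g. on getBestAbbreviations([[]], []): A returns [[]], B returns []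
import Mathlib
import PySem

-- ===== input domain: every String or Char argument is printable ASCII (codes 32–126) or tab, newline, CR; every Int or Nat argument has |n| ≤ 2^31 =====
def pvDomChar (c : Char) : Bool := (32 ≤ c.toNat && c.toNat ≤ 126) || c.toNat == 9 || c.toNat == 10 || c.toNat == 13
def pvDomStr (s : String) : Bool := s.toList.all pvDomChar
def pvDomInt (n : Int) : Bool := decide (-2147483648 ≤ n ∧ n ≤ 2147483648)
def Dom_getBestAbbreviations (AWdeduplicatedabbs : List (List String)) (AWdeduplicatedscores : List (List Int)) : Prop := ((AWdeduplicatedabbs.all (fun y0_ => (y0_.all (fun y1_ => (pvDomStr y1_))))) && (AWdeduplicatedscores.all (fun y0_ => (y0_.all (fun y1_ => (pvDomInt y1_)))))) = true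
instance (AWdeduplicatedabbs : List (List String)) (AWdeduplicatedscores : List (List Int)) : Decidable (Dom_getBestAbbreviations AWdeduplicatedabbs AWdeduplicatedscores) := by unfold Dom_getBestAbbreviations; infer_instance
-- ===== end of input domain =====

-- B merges A's two passes per name (find the minimum score, then re-scan for ties) into one
-- zip pass keeping a running best score and running best list; equal return values on Pre_.

-- ===== PORT A =====
def getBestAbbreviations (AWdeduplicatedabbs : List (List String)) (AWdeduplicatedscores : List (List Int)) : List (List String) :=
  (PySem.List.pyRange 0 (AWdeduplicatedabbs.length : Int) 1).foldl (fun bestforeachname nameindex =>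
    let la := PySem.List.pyGetD AWdeduplicatedabbs nameindex []
    let lsc := PySem.List.pyGetD AWdeduplicatedscores nameindex []
    let lowestscore : PySem.Dict String Int :=
      (PySem.List.pyRange 0 (la.length : Int) 1).foldl (fun d abbindex =>
        let currentscore := PySem.List.pyGetD lsc abbindex 0
        if (d.size == 0) || (!(d.size == 0) && currentscore < (d.get? "lowest").getD 0)
        then d.insert "lowest" currentscore else d) PySem.Dict.empty
    let bestforthisname : List String :=
      (PySem.List.pyRange 0 (la.length : Int) 1).foldl (fun b abbindex =>
        if PySem.List.pyGetD lsc abbindex 0 == (lowestscore.get? "lowest").getD 0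
        then b ++ [PySem.List.pyGetD la abbindex ""] else b) []
    bestforeachname ++ [bestforthisname]) []

-- ===== PORT B =====
-- single pass over the (abbreviation, score) pairs of one name
def bestPass (pairs : List (String × Int)) : Option Int × List String :=
  pairs.foldl (fun st p =>
    match st.1 with
    | none => (some p.2, [p.1])
    | some m =>
        if p.2 < m then (some p.2, [p.1])
        else if p.2 == m then (some m, st.2 ++ [p.1])
        else st) (none, [])

def getBestAbbreviations_alt (AWdeduplicatedabbs : List (List String)) (AWdeduplicatedscores : List (List Int)) : List (List String) :=
  (AWdeduplicatedabbs.zip AWdeduplicatedscores).foldl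
    (fun res q => res ++ [(bestPass (q.1.zip q.2)).2]) []

-- ===== PRECONDITION & SPEC =====
-- Pre_ requires the two parallel lists to have matching shape (a score row for every name, at
-- least as many scores as abbreviations per name): A raises IndexError whenever a nonempty
-- abbreviation row lacks a score; the shape condition additionally excludes the degenerate
-- mismatched inputs whose extra rows are all empty, on which A happens to return.
def Pre_getBestAbbreviations (AWdeduplicatedabbs : List (List String)) (AWdeduplicatedscores : List (List Int)) : Prop :=
  AWdeduplicatedabbs.length ≤ AWdeduplicatedscores.length ∧
  ∀ p ∈ AWdeduplicatedabbs.zip AWdeduplicatedscores, p.1.length ≤ p.2.length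
instance (AWdeduplicatedabbs : List (List String)) (AWdeduplicatedscores : List (List Int)) : Decidable (Pre_getBestAbbreviations AWdeduplicatedabbs AWdeduplicatedscores) := by unfold Pre_getBestAbbreviations; infer_instance
def pvWitness_getBestAbbreviations : List (List String) × List (List Int) :=
  ([["ab", "abb", "a"], []], [[2, 1, 1], []])
def Spec_getBestAbbreviations (AWdeduplicatedabbs : List (List String)) (AWdeduplicatedscores : List (List Int)) (out : List (List String)) : Prop := out = getBestAbbreviations_alt AWdeduplicatedabbs AWdeduplicatedscores
instance (AWdeduplicatedabbs : List (List String)) (AWdeduplicatedscores : List (List Int)) (out : List (List String)) : Decidable (Spec_getBestAbbreviations AWdeduplicatedabbs AWdeduplicatedscores out) := by unfold Spec_getBestAbbreviations; infer_instance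

-- ===== CLAIM (what is proved, stated in full; the proofs are below) =====
def Claim_equal_getBestAbbreviations : Prop := ∀ (AWdeduplicatedabbs : List (List String)) (AWdeduplicatedscores : List (List Int)), Dom_getBestAbbreviations AWdeduplicatedabbs AWdeduplicatedscores → Pre_getBestAbbreviations AWdeduplicatedabbs AWdeduplicatedscores → Spec_getBestAbbreviations AWdeduplicatedabbs AWdeduplicatedscores (getBestAbbreviations AWdeduplicatedabbs AWdeduplicatedscores)

-- ===== LEMMAS AND PROOFS =====

-- an indexed loop over two parallel lists is a fold over their zip
theorem foldl_idx_zip {α β γ : Type} (xs : List α) (ys : List β)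
    (h : xs.length ≤ ys.length) (da : α) (db : β)
    (f : γ → α → β → γ) (init : γ) :
    (PySem.List.pyRange 0 (xs.length : Int) 1).foldl
      (fun acc j => f acc (PySem.List.pyGetD xs j da) (PySem.List.pyGetD ys j db)) init
    = (xs.zip ys).foldl (fun acc p => f acc p.1 p.2) init := by
  have hlen : (xs.zip ys).length = xs.length := by
    simp [List.length_zip]; omega
  rw [show ((xs.length : Int)) = (((xs.zip ys).length : Nat) : Int) from by rw [hlen]]
  rw [PySem.List.foldl_congr_mem _ _
    (fun acc j => f acc (PySem.List.pyGetD (xs.zip ys) j (da, db)).1 (PySem.List.pyGetD (xs.zip ys) j (da, db)).2) _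
    (by
      intro acc j hj
      have hb := (PySem.List.mem_pyRange_one).1 hj
      have h0 : 0 ≤ j := hb.1
      have h1 : j.toNat < (xs.zip ys).length := by omega
      have hjx : j.toNat < xs.length := by omega
      have hjy : j.toNat < ys.length := by omega
      show f acc (PySem.List.pyGetD xs j da) (PySem.List.pyGetD ys j db)
          = f acc (PySem.List.pyGetD (xs.zip ys) j (da, db)).1 (PySem.List.pyGetD (xs.zip ys) j (da, db)).2
      rw [PySem.List.pyGetD_eq_getElem (xs.zip ys) _ h0 (by omega),
          PySem.List.pyGetD_eq_getElem xs _ h0 (by omega),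
          PySem.List.pyGetD_eq_getElem ys _ h0 (by omega)]
      simp [List.getElem_zip])]
  exact PySem.List.foldl_pyRange_zero_pyGetD' (xs.zip ys) (da, db)
    (fun acc p => f acc p.1 p.2) init

-- an indexed loop reading only the second list, bounded by the first one's length
theorem foldl_idx_take {β γ : Type} (n : Nat) (ys : List β) (h : n ≤ ys.length)
    (d : β) (f : γ → β → γ) (init : γ) :
    (PySem.List.pyRange 0 (n : Int) 1).foldl
      (fun acc j => f acc (PySem.List.pyGetD ys j d)) init
    = (ys.take n).foldl f init := by
  have hlen : (ys.take n).length = n := by simp [List.length_take]; omega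
  rw [show ((n : Nat) : Int) = (((ys.take n).length : Nat) : Int) from by rw [hlen]]
  rw [PySem.List.foldl_congr_mem _ _
    (fun acc j => f acc (PySem.List.pyGetD (ys.take n) j d)) _
    (by
      intro acc j hj
      have hb := (PySem.List.mem_pyRange_one).1 hj
      have h0 : 0 ≤ j := hb.1
      have h1 : j.toNat < (ys.take n).length := by omega
      have hjy : j.toNat < ys.length := by omega
      show f acc (PySem.List.pyGetD ys j d) = f acc (PySem.List.pyGetD (ys.take n) j d)
      rw [PySem.List.pyGetD_eq_getElem (ys.take n) _ h0 (by omega),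
          PySem.List.pyGetD_eq_getElem ys _ h0 (by omega)]
      simp [List.getElem_take])]
  exact PySem.List.foldl_pyRange_zero_pyGetD' (ys.take n) d f init

theorem zip_map_snd (l1 : List String) (l2 : List Int) (h : l1.length ≤ l2.length) :
    (l1.zip l2).map (·.2) = l2.take l1.length := by
  induction l1 generalizing l2 with
  | nil => simp
  | cons a t ih => cases l2 with
    | nil => simp at h
    | cons b u => simp_all

-- running minimum of the scores of a pair list
def minP (pairs : List (String × Int)) (m : Int) : Int :=
  pairs.foldl (fun acc p => min acc p.2) m

theorem minP_le (pairs : List (String × Int)) (m : Int) : minP pairs m ≤ m := by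
  induction pairs generalizing m with
  | nil => simp [minP]
  | cons p t ih =>
      have := ih (min m p.2)
      simp only [minP, List.foldl_cons] at *
      omega

-- the one-key dict loop of A computes the running minimum
theorem dict_fold_min (ss : List Int) (m : Int) :
    ss.foldl (fun d s =>
        if (d.size == 0) || (!(d.size == 0) && s < (d.get? "lowest").getD 0)
        then d.insert "lowest" s else d) (PySem.Dict.mk [("lowest", m)])
    = PySem.Dict.mk [("lowest", ss.foldl min m)] := by
  induction ss generalizing m with
  | nil => rfl
  | cons s t ih =>
      simp only [List.foldl_cons]
      by_cases hc : s < m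
      · rw [show (if ((PySem.Dict.mk [("lowest", m)]).size == 0) ||
              (!((PySem.Dict.mk [("lowest", m)]).size == 0) && s < ((PySem.Dict.mk [("lowest", m)]).get? "lowest").getD 0)
            then (PySem.Dict.mk [("lowest", m)]).insert "lowest" s else (PySem.Dict.mk [("lowest", m)]))
            = PySem.Dict.mk [("lowest", s)] from by
          simp [PySem.Dict.size, PySem.Dict.get?, PySem.Dict.insert, PySem.Dict.contains, List.find?, hc]]
        rw [ih, min_eq_right (le_of_lt hc)]
      · rw [show (if ((PySem.Dict.mk [("lowest", m)]).size == 0) ||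
              (!((PySem.Dict.mk [("lowest", m)]).size == 0) && s < ((PySem.Dict.mk [("lowest", m)]).get? "lowest").getD 0)
            then (PySem.Dict.mk [("lowest", m)]).insert "lowest" s else (PySem.Dict.mk [("lowest", m)]))
            = PySem.Dict.mk [("lowest", m)] from by
          simp [PySem.Dict.size, PySem.Dict.get?, List.find?, hc]]
        rw [ih, min_eq_left (by omega)]

-- B's running state after a prefix: the running minimum and the best list so far
theorem bestPass_inv (pairs : List (String × Int)) (m : Int) (lst : List String) :
    pairs.foldl (fun st p =>
      match st.1 with
      | none => (some p.2, [p.1])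
      | some mm =>
          if p.2 < mm then (some p.2, [p.1])
          else if p.2 == mm then (some mm, st.2 ++ [p.1])
          else st) ((some m : Option Int), lst)
    = (some (minP pairs m),
       (if minP pairs m < m then [] else lst)
       ++ (pairs.filter (fun p => p.2 == minP pairs m)).map (·.1)) := by
  induction pairs generalizing m lst with
  | nil => simp [minP]
  | cons q t ih =>
      have hmin : minP (q :: t) m = minP t (min m q.2) := by simp [minP]
      have hle := minP_le t (min m q.2)
      simp only [List.foldl_cons]
      by_cases h1 : q.2 < m
      · rw [if_pos h1, ih, hmin]
        have hms : min m q.2 = q.2 := by omega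
        have hle2 : minP t q.2 ≤ q.2 := hms ▸ hle
        rw [hms]
        by_cases h2 : minP t q.2 < q.2
        · have hq : (q.2 == minP t q.2) = false := by simp; omega
          have h3 : minP t q.2 < m := by omega
          simp [hq, h2, h3]
        · have heq : minP t q.2 = q.2 := by omega
          have hq : (q.2 == minP t q.2) = true := by simp [heq]
          have h3 : minP t q.2 < m := by omega
          simp [hq, h2, h3]
      · by_cases h2 : q.2 = m
        · have hq2 : (q.2 == m) = true := by simp [h2]
          rw [if_neg h1, if_pos hq2, ih, hmin]
          have hmm : min m q.2 = m := by omega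
          rw [hmm]
          by_cases h3 : minP t m < m
          · have hq : (q.2 == minP t m) = false := by simp; omega
            simp [hq, h3]
          · have heq : minP t m = m := by have := minP_le t m; omega
            have hq : (q.2 == minP t m) = true := by simp [heq, h2]
            simp [h2, heq]
        · have h4 : m < q.2 := by omega
          have hq2 : ¬((q.2 == m) = true) := by simp; omega
          rw [if_neg h1, if_neg hq2, ih, hmin]
          have hmm : min m q.2 = m := by omega
          rw [hmm]
          have hq : (q.2 == minP t m) = false := by
            have := minP_le t m; simp; omega
          simp [hq]

-- A's per-name computation equals B's single pass
theorem name_eq (la : List String) (lsc : List Int) (h : la.length ≤ lsc.length) :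
    ((PySem.List.pyRange 0 (la.length : Int) 1).foldl (fun b abbindex =>
        if PySem.List.pyGetD lsc abbindex 0 ==
            (((PySem.List.pyRange 0 (la.length : Int) 1).foldl (fun d abbindex =>
                let currentscore := PySem.List.pyGetD lsc abbindex 0
                if (d.size == 0) || (!(d.size == 0) && currentscore < (d.get? "lowest").getD 0)
                then d.insert "lowest" currentscore else d) PySem.Dict.empty).get? "lowest").getD 0
        then b ++ [PySem.List.pyGetD la abbindex ""] else b) [])
    = (bestPass (la.zip lsc)).2 := by
  cases la with
  | nil => simp [bestPass, PySem.List.pyRange_one_eq_nil]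
  | cons a la' =>
      cases lsc with
      | nil => simp at h
      | cons s lsc' =>
          have h' : la'.length ≤ lsc'.length := by simp at h; omega
          -- the dict fold, as a fold over the zipped pairs' scores
          have hdict : ((PySem.List.pyRange 0 (((a :: la').length : Nat) : Int) 1).foldl (fun d abbindex =>
                let currentscore := PySem.List.pyGetD (s :: lsc') abbindex 0
                if (d.size == 0) || (!(d.size == 0) && currentscore < (d.get? "lowest").getD 0)
                then d.insert "lowest" currentscore else d) PySem.Dict.empty)
              = PySem.Dict.mk [("lowest", minP (la'.zip lsc') s)] := by
            have h1 := foldl_idx_take (a :: la').length (s :: lsc') h 0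
              (fun d currentscore =>
                if (d.size == 0) || (!(d.size == 0) && currentscore < (d.get? "lowest").getD 0)
                then d.insert "lowest" currentscore else d) PySem.Dict.empty
            rw [h1]
            have htake : (s :: lsc').take (a :: la').length = s :: lsc'.take la'.length := by
              simp
            rw [htake]
            simp only [List.foldl_cons]
            rw [show (if ((PySem.Dict.empty : PySem.Dict String Int).size == 0) ||
                (!((PySem.Dict.empty : PySem.Dict String Int).size == 0) && s < ((PySem.Dict.empty : PySem.Dict String Int).get? "lowest").getD 0)
              then (PySem.Dict.empty : PySem.Dict String Int).insert "lowest" s else PySem.Dict.empty)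
              = PySem.Dict.mk [("lowest", s)] from by rfl]
            rw [dict_fold_min]
            have : lsc'.take la'.length = (la'.zip lsc').map (·.2) := (zip_map_snd la' lsc' h').symm
            rw [this, List.foldl_map]
            rfl
          rw [hdict]
          have hget : ((PySem.Dict.mk [("lowest", minP (la'.zip lsc') s)]).get? "lowest").getD 0
              = minP (la'.zip lsc') s := by rfl
          rw [hget]
          -- the collection fold, as a filter over the zipped pairs
          rw [foldl_idx_zip (a :: la') (s :: lsc') h "" 0
            (fun b abb sc => if sc == minP (la'.zip lsc') s then b ++ [abb] else b) []]
          rw [PySem.List.foldl_append_if (fun p : String × Int => p.2 == minP (la'.zip lsc') s) (·.1)]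
          -- B's side
          show _ = (bestPass ((a, s) :: la'.zip lsc')).2
          rw [show bestPass ((a, s) :: la'.zip lsc')
              = (la'.zip lsc').foldl (fun st p =>
                  match st.1 with
                  | none => (some p.2, [p.1])
                  | some mm =>
                      if p.2 < mm then (some p.2, [p.1])
                      else if p.2 == mm then (some mm, st.2 ++ [p.1])
                      else st) ((some s : Option Int), [a]) from by rfl]
          rw [bestPass_inv]
          have hle := minP_le (la'.zip lsc') s
          by_cases hlt : minP (la'.zip lsc') s < s
          · have hq : (s == minP (la'.zip lsc') s) = false := by simp; omega
            simp [List.zip_cons_cons, hq, hlt]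
          · have heq : minP (la'.zip lsc') s = s := by omega
            have hq : (s == minP (la'.zip lsc') s) = true := by simp [heq]
            simp [List.zip_cons_cons, hq, hlt]

theorem getBestAbbreviations_spec : Claim_equal_getBestAbbreviations := by
  intro abbs scores _hdom hpre
  unfold Spec_getBestAbbreviations
  show getBestAbbreviations abbs scores = getBestAbbreviations_alt abbs scores
  unfold getBestAbbreviations getBestAbbreviations_alt
  have houter := foldl_idx_zip abbs scores hpre.1 ([] : List String) ([] : List Int)
    (fun (res : List (List String)) la lsc => res ++
      [(PySem.List.pyRange 0 (la.length : Int) 1).foldl (fun b abbindex =>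
        if PySem.List.pyGetD lsc abbindex 0 ==
            (((PySem.List.pyRange 0 (la.length : Int) 1).foldl (fun d abbindex =>
                let currentscore := PySem.List.pyGetD lsc abbindex 0
                if (d.size == 0) || (!(d.size == 0) && currentscore < (d.get? "lowest").getD 0)
                then d.insert "lowest" currentscore else d) PySem.Dict.empty).get? "lowest").getD 0
        then b ++ [PySem.List.pyGetD la abbindex ""] else b) []]) []
  rw [houter]
  exact PySem.List.foldl_congr_mem _ _ _ _ (fun acc q hq => by
    have := name_eq q.1 q.2 (hpre.2 q hq)
    simp only [this])

-- ===== VERDICT (by name: the statement is the Claim_ definition above) =====
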